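-- pv_equiv track=rewrite | github.com/pypi-data/pypi-mirror-113 | packages/plt-pack/plt_pack-0.0.3.2.tar.gz/plt_pack-0.0.3.2/src/plt_pack/parse/get_source_code.py | _remove_decorators
-- ===== SOURCE A (Python) =====
-- def _remove_decorators(func_code: str):
--     counts = 0
--     lines = func_code.split('\n')
--
--     for line in lines:
--         if line.startswith('def '):
--             break
--         counts += 1
--     return '\n'.join(lines[counts:])
-- ===== SOURCE B (Python) =====
-- def _remove_decorators(func_code: str):
--     if func_code.startswith('def '):
--         return func_code
--     idx = func_code.find('\ndef ')
--     if idx == -1: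
--         return ''
--     return func_code[idx + 1:]
-- ===== Notes on version B (the rewrite author's own statement) =====
-- stated objective: idiomatic
-- what changed: B replaces A's split-into-lines, count-with-break loop and join re-assembly by a single substring search for a newline immediately followed by a def keyword on the raw string (plus a startswith check for a def on the first line) and one slice.
import Mathlib
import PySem

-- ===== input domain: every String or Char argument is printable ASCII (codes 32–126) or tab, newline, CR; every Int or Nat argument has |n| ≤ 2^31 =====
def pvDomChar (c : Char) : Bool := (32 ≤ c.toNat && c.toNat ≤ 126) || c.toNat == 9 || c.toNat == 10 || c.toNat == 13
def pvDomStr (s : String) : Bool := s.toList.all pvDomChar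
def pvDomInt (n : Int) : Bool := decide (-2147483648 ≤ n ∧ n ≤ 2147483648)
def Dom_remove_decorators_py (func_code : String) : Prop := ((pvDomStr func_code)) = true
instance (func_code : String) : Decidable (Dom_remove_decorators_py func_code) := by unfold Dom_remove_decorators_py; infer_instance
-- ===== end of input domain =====

-- B replaces A's split-into-lines / count-loop / rejoin by a single substring search for "\ndef "
-- on the raw string plus one slice (alternative algorithm, same return value).

-- ===== PORT A =====
-- the for-line loop with break: number of leading lines not starting with "def "
def pvCountA : List String → Int
  | [] => 0
  | l :: ls => if PySem.Str.startswith l "def " then 0 else 1 + pvCountA ls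

def remove_decorators_py (func_code : String) : String :=
  -- func_code.split('\n'): sep is nonempty, so split? is always `some`; getD [] is unreachable
  let lines := (PySem.Str.split? func_code "\n").getD []
  PySem.Str.join "\n" (PySem.List.slice lines (some (pvCountA lines)) none)

-- ===== PORT B =====
def remove_decorators_py_alt (func_code : String) : String :=
  if PySem.Str.startswith func_code "def " then func_code
  else
    let idx := PySem.Str.find func_code "\ndef "
    if idx = -1 then "" else PySem.Str.slice func_code (some (idx + 1)) none

-- ===== PRECONDITION & SPEC =====
def Spec_remove_decorators_py (func_code : String) (out : String) : Prop := out = remove_decorators_py_alt func_code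
instance (func_code : String) (out : String) : Decidable (Spec_remove_decorators_py func_code out) := by unfold Spec_remove_decorators_py; infer_instance

-- ===== CLAIM (what is proved, stated in full; the proofs are below) =====
def Claim_equal_remove_decorators_py : Prop := ∀ (func_code : String), Dom_remove_decorators_py func_code → Spec_remove_decorators_py func_code (remove_decorators_py func_code)

-- ===== LEMMAS AND PROOFS =====

-- "def " as a char list, and the line predicate of A's loop
def pvDef : List Char := ['d', 'e', 'f', ' ']

def pvQ (l : List Char) : Bool := !PySem.Chars.startswith l pvDef

-- structural model of s.split('\n')
def pvSplit : List Char → List (List Char)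
  | [] => [[]]
  | c :: r =>
    if c = '\n' then [] :: pvSplit r
    else
      match pvSplit r with
      | [] => [[c]]
      | l :: ls => (c :: l) :: ls

-- the common spec: walk the string; at a line start, a "def " prefix wins the whole suffix
def pvG : Bool → List Char → List Char
  | _, [] => []
  | b, c :: r => if b && PySem.Chars.startswith (c :: r) pvDef then c :: r else pvG (c == '\n') r

theorem pvSplit_ne_nil (s : List Char) : pvSplit s ≠ [] := by
  cases s with
  | nil => simp [pvSplit]
  | cons c r =>
    simp only [pvSplit]
    split
    · simp
    · cases h : pvSplit r <;> simp

theorem pvSplit_headI_tail (l : List Char) :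
    (pvSplit l).headI :: (pvSplit l).tail = pvSplit l := by
  have hne := pvSplit_ne_nil l
  cases h : pvSplit l with
  | nil => exact absurd h hne
  | cons x xs => simp

theorem pvSplitOn_go_eq (fuel : Nat) :
    ∀ (l cur : List Char) (acc : List (List Char)), l.length < fuel →
      PySem.Chars.splitOn.go ['\n'] fuel l cur acc
        = acc.reverse ++ (cur.reverse ++ (pvSplit l).headI) :: (pvSplit l).tail := by
  induction fuel with
  | zero => intro l cur acc h; omega
  | succ n ih =>
    intro l cur acc h
    cases l with
    | nil => simp [PySem.Chars.splitOn.go, pvSplit]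
    | cons c rest =>
      by_cases hc : c = '\n'
      · subst hc
        have hpfx : List.isPrefixOf ['\n'] ('\n' :: rest) = true := by
          simp [List.isPrefixOf]
        rw [show PySem.Chars.splitOn.go ['\n'] (n+1) ('\n' :: rest) cur acc
              = PySem.Chars.splitOn.go ['\n'] n (List.drop (List.length ['\n']) ('\n' :: rest)) [] (cur.reverse :: acc) by
            simp [PySem.Chars.splitOn.go, hpfx]]
        simp only [List.length_singleton, List.drop_succ_cons, List.drop_zero]
        rw [ih rest [] (cur.reverse :: acc) (by simpa using h)]
        simp [pvSplit, pvSplit_headI_tail]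
      · have hne : ('\n' == c) = false := beq_eq_false_iff_ne.mpr fun h' => hc h'.symm
        have hpfx : List.isPrefixOf ['\n'] (c :: rest) = false := by
          simp [List.isPrefixOf, hne]
        rw [show PySem.Chars.splitOn.go ['\n'] (n+1) (c :: rest) cur acc
              = PySem.Chars.splitOn.go ['\n'] n rest (c :: cur) acc by
            simp [PySem.Chars.splitOn.go, hpfx]]
        rw [ih rest (c :: cur) acc (by simpa using h)]
        have hne := pvSplit_ne_nil rest
        cases hr : pvSplit rest with
        | nil => exact absurd hr hne
        | cons l ls => simp [pvSplit, hc, hr]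

theorem pvSplitOn_eq (s : List Char) : PySem.Chars.splitOn s ['\n'] = pvSplit s := by
  rw [PySem.Chars.splitOn, pvSplitOn_go_eq (s.length + 1) s [] [] (by omega)]
  have hne := pvSplit_ne_nil s
  cases h : pvSplit s with
  | nil => exact absurd h hne
  | cons l ls => simp

-- A's count-then-drop is dropWhile
theorem pvCountA_nonneg (L : List String) : 0 ≤ pvCountA L := by
  induction L with
  | nil => simp [pvCountA]
  | cons y ys ihy => simp only [pvCountA]; split <;> omega

theorem pvDrop_count (L : List String) :
    List.drop (pvCountA L).toNat L = L.dropWhile (fun l => !PySem.Str.startswith l "def ") := by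
  induction L with
  | nil => simp [pvCountA]
  | cons x xs ih =>
    by_cases hx : PySem.Str.startswith x "def " = true
    · have h0 : pvCountA (x :: xs) = 0 := by simp only [pvCountA]; rw [if_pos hx]
      rw [h0, List.dropWhile_cons, hx]
      simp
    · have hx' : PySem.Str.startswith x "def " = false := Bool.eq_false_iff.mpr hx
      have h1 : pvCountA (x :: xs) = 1 + pvCountA xs := by
        simp only [pvCountA]; rw [if_neg hx]
      have hnn := pvCountA_nonneg xs
      have ht : (pvCountA (x :: xs)).toNat = (pvCountA xs).toNat + 1 := by rw [h1]; omega
      rw [List.dropWhile_cons, hx', ht, List.drop_succ_cons, ih]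
      simp

-- A's port, on char lists
theorem pvA_chars (f : String) :
    (remove_decorators_py f).toList
      = PySem.Chars.join ['\n'] ((pvSplit f.toList).dropWhile pvQ) := by
  have hsome : PySem.Str.split? f "\n" = some ((PySem.Chars.splitOn f.toList ['\n']).map String.ofList) := by
    rw [PySem.Str.split?, show ("\n" : String).toList = ['\n'] by decide, PySem.Chars.split?]
    simp
  show (PySem.Str.join "\n"
      (PySem.List.slice ((PySem.Str.split? f "\n").getD [])
        (some (pvCountA ((PySem.Str.split? f "\n").getD []))) none)).toList = _
  rw [hsome, Option.getD_some, PySem.List.slice_from _ (pvCountA_nonneg _), pvDrop_count,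
    PySem.Str.toList_join, List.dropWhile_map, List.map_map]
  rw [show ("\n" : String).toList = ['\n'] by decide, pvSplitOn_eq]
  have h1 : (String.toList ∘ String.ofList) = (id : List Char → List Char) := by
    funext l
    simp
  have h2 : ((fun l => !PySem.Str.startswith l "def ") ∘ String.ofList) = pvQ := by
    funext l
    simp [pvQ, show ("def " : String).toList = pvDef from by decide]
  rw [h1, h2, List.map_id]

-- B's port, on char lists
theorem pvB_chars (f : String) :
    (remove_decorators_py_alt f).toList
      = if PySem.Chars.startswith f.toList pvDef then f.toList
        else if PySem.Chars.find f.toList ('\n' :: pvDef) = -1 then []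
        else List.drop ((PySem.Chars.find f.toList ('\n' :: pvDef)).toNat + 1) f.toList := by
  have hsw : PySem.Str.startswith f "def " = PySem.Chars.startswith f.toList pvDef := by
    rw [show pvDef = ("def " : String).toList by decide]
    simp
  have hfind : PySem.Str.find f "\ndef " = PySem.Chars.find f.toList ('\n' :: pvDef) := by
    rw [show ('\n' :: pvDef) = ("\ndef " : String).toList by decide]
    simp
  unfold remove_decorators_py_alt
  show (if PySem.Str.startswith f "def " then f
        else if PySem.Str.find f "\ndef " = -1 then ""
        else PySem.Str.slice f (some (PySem.Str.find f "\ndef " + 1)) none).toList = _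
  rw [hsw, hfind]
  split_ifs with h1 h2
  · rfl
  · decide
  · have hge : 0 ≤ PySem.Chars.find f.toList ('\n' :: pvDef) := by
      have := PySem.Chars.neg_one_le_find f.toList ('\n' :: pvDef)
      omega
    simp only [PySem.Str.slice, String.toList_ofList, PySem.Chars.slice_eq_listSlice]
    rw [PySem.List.slice_from _ (by omega)]
    congr 1
    omega

-- ===== facts about pvG =====

theorem pvG_of_startswith {s : List Char} (h : PySem.Chars.startswith s pvDef = true) :
    pvG true s = s := by
  cases s with
  | nil =>
    exfalso
    have := (PySem.Chars.startswith_iff _ _).mp h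
    have := this.length_le
    simp [pvDef] at this
  | cons c r => simp [pvG, h]

theorem pvG_nil_of_no_infix :
    ∀ (s : List Char) (b : Bool), ¬ ('\n' :: pvDef) <:+: s →
      (b = true → ¬ pvDef <+: s) → pvG b s = [] := by
  intro s
  induction s with
  | nil => intro b _ _; simp [pvG]
  | cons c r ih =>
    intro b hinf hb
    have hguard : (b && PySem.Chars.startswith (c :: r) pvDef) = false := by
      cases b with
      | false => simp
      | true =>
        simp only [Bool.true_and]
        rw [Bool.eq_false_iff]
        intro hsw
        exact hb rfl ((PySem.Chars.startswith_iff _ _).mp hsw)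
    simp only [pvG, hguard, Bool.false_eq_true, if_false]
    apply ih
    · intro hinf'
      exact hinf (List.infix_cons hinf')
    · intro hc hpr
      have hcc : c = '\n' := by simpa using hc
      subst hcc
      exact hinf (List.IsPrefix.isInfix (List.cons_prefix_cons.mpr ⟨rfl, hpr⟩))

theorem pvG_drop_of_find :
    ∀ (s : List Char) (b : Bool) (k : Nat),
      ('\n' :: pvDef) <+: List.drop k s →
      (∀ i < k, ¬ ('\n' :: pvDef) <+: List.drop i s) →
      (b = true → ¬ pvDef <+: s) →
      pvG b s = List.drop (k + 1) s := by
  intro s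
  induction s with
  | nil =>
    intro b k hk _ _
    rw [List.drop_nil] at hk
    have := hk.length_le
    simp [pvDef] at this
  | cons c r ih =>
    intro b k hk hmin hb
    have hguard : (b && PySem.Chars.startswith (c :: r) pvDef) = false := by
      cases b with
      | false => simp
      | true =>
        simp only [Bool.true_and]
        rw [Bool.eq_false_iff]
        intro hsw
        exact hb rfl ((PySem.Chars.startswith_iff _ _).mp hsw)
    simp only [pvG, hguard, Bool.false_eq_true, if_false]
    cases k with
    | zero =>
      rw [List.drop_zero] at hk
      obtain ⟨t, ht⟩ := hk
      rw [List.cons_append] at ht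
      injection ht with hch hrt
      have hsw : PySem.Chars.startswith r pvDef = true :=
        (PySem.Chars.startswith_iff _ _).mpr ⟨t, hrt⟩
      rw [show (c == '\n') = true by simp [← hch], pvG_of_startswith hsw,
        List.drop_succ_cons, List.drop_zero]
    | succ k' =>
      have hk' : ('\n' :: pvDef) <+: List.drop k' r := by
        simpa [List.drop_succ_cons] using hk
      have hmin' : ∀ i < k', ¬ ('\n' :: pvDef) <+: List.drop i r := by
        intro i hi hpf
        exact hmin (i + 1) (by omega) (by simpa [List.drop_succ_cons] using hpf)
      have hb' : (c == '\n') = true → ¬ pvDef <+: r := by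
        intro hc hpr
        apply hmin 0 (by omega)
        rw [List.drop_zero]
        have hcc : c = '\n' := by simpa using hc
        subst hcc
        exact List.cons_prefix_cons.mpr ⟨rfl, hpr⟩
      rw [ih (c == '\n') k' hk' hmin' hb']
      simp [List.drop_succ_cons]

-- ===== line decomposition facts =====

theorem pvSplit_no_nl {s : List Char} (h : '\n' ∉ s) : pvSplit s = [s] := by
  induction s with
  | nil => rfl
  | cons c r ih =>
    have hc : c ≠ '\n' := fun hc => h (hc ▸ List.mem_cons_self)
    have hr : '\n' ∉ r := fun hr => h (List.mem_cons_of_mem _ hr)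
    simp [pvSplit, hc, ih hr]

theorem pvSplit_line {a : List Char} (rest : List Char) (h : '\n' ∉ a) :
    pvSplit (a ++ '\n' :: rest) = a :: pvSplit rest := by
  induction a with
  | nil => simp [pvSplit]
  | cons c a' ih =>
    have hc : c ≠ '\n' := fun hc => h (hc ▸ List.mem_cons_self)
    have ha' : '\n' ∉ a' := fun hr => h (List.mem_cons_of_mem _ hr)
    simp only [List.cons_append, pvSplit, if_neg hc, ih ha']

theorem pvJoin_pvSplit (s : List Char) : PySem.Chars.join ['\n'] (pvSplit s) = s := by
  induction s with
  | nil => decide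
  | cons c r ih =>
    by_cases hc : c = '\n'
    · subst hc
      have hne := pvSplit_ne_nil r
      cases hr : pvSplit r with
      | nil => exact absurd hr hne
      | cons l ls =>
        rw [pvSplit, if_pos rfl, hr, PySem.Chars.join_cons_cons]
        rw [hr] at ih
        simp [ih]
    · have hne := pvSplit_ne_nil r
      cases hr : pvSplit r with
      | nil => exact absurd hr hne
      | cons l ls =>
        simp only [pvSplit, if_neg hc, hr]
        rw [hr] at ih
        cases ls with
        | nil =>
          rw [PySem.Chars.join_singleton] at ih ⊢
          simp [ih]
        | cons m ms =>
          rw [PySem.Chars.join_cons_cons] at ih ⊢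
          simp [ih]

theorem pvG_false_no_nl {s : List Char} (h : '\n' ∉ s) : pvG false s = [] := by
  induction s with
  | nil => rfl
  | cons c r ih =>
    have hc : c ≠ '\n' := fun hc => h (hc ▸ List.mem_cons_self)
    have hr : '\n' ∉ r := fun hr => h (List.mem_cons_of_mem _ hr)
    simp only [pvG, Bool.false_and, Bool.false_eq_true, if_false]
    rw [show (c == '\n') = false by simp [hc]]
    exact ih hr

theorem pvG_false_line {a : List Char} (rest : List Char) (h : '\n' ∉ a) :
    pvG false (a ++ '\n' :: rest) = pvG true rest := by
  induction a with
  | nil => simp [pvG]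
  | cons c a' ih =>
    have hc : c ≠ '\n' := fun hc => h (hc ▸ List.mem_cons_self)
    have ha' : '\n' ∉ a' := fun hr => h (List.mem_cons_of_mem _ hr)
    simp only [List.cons_append, pvG, Bool.false_and, Bool.false_eq_true, if_false]
    rw [show (c == '\n') = false by simp [hc]]
    exact ih ha'

-- "def " has no newline, so a prefix test cannot cross the line break
theorem pvPrefix_line {a : List Char} (rest : List Char) (h : '\n' ∉ a) :
    pvDef <+: (a ++ '\n' :: rest) ↔ pvDef <+: a := by
  constructor
  · intro hp
    have ha : a <+: (a ++ '\n' :: rest) := ⟨'\n' :: rest, rfl⟩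
    rcases List.prefix_or_prefix_of_prefix hp ha with h1 | h1
    · exact h1
    · obtain ⟨t, ht⟩ := h1
      cases t with
      | nil =>
        rw [List.append_nil] at ht
        subst ht
        exact List.prefix_rfl
      | cons x t' =>
        exfalso
        rw [← ht] at hp
        have hx : x :: t' <+: '\n' :: rest := (List.prefix_append_right_inj a).mp hp
        have hxe : x = '\n' := (List.cons_prefix_cons.mp hx).1
        have : '\n' ∈ pvDef := by
          rw [← ht, hxe]
          simp
        exact absurd this (by decide)
  · intro hp
    exact hp.trans ⟨'\n' :: rest, rfl⟩

-- ===== A's form equals pvG true =====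

theorem pvExists_line : ∀ {s : List Char}, '\n' ∈ s →
    ∃ a rest, '\n' ∉ a ∧ s = a ++ '\n' :: rest := by
  intro s h
  induction s with
  | nil => cases h
  | cons c r ih =>
    by_cases hc : c = '\n'
    · exact ⟨[], r, by simp, by simp [hc]⟩
    · have hr : '\n' ∈ r := by
        rcases List.mem_cons.mp h with h1 | h1
        · exact absurd h1.symm hc
        · exact h1
      obtain ⟨a, rest, ha, hd⟩ := ih hr
      refine ⟨c :: a, rest, ?_, by simp [hd]⟩
      intro hmem
      rcases List.mem_cons.mp hmem with h1 | h1
      · exact hc h1.symm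
      · exact ha h1

theorem pvA_eq_pvG : ∀ (n : Nat) (s : List Char), s.length ≤ n →
    PySem.Chars.join ['\n'] ((pvSplit s).dropWhile pvQ) = pvG true s := by
  intro n
  induction n with
  | zero =>
    intro s hs
    have : s = [] := by cases s <;> simp_all
    subst this
    decide
  | succ n ih =>
    intro s hs
    by_cases hnl : '\n' ∈ s
    · -- s = a ++ '\n' :: rest with '\n' ∉ a
      obtain ⟨a, rest, ha, hdec⟩ := pvExists_line hnl
      subst hdec
      rw [pvSplit_line rest ha]
      by_cases hsw : PySem.Chars.startswith a pvDef = true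
      · have hq : pvQ a = false := by simp [pvQ, hsw]
        rw [List.dropWhile_cons, hq, if_neg (by simp)]
        have hne := pvSplit_ne_nil rest
        cases hr : pvSplit rest with
        | nil => exact absurd hr hne
        | cons l ls =>
          rw [PySem.Chars.join_cons_cons]
          have hj : PySem.Chars.join ['\n'] (pvSplit rest) = rest := pvJoin_pvSplit rest
          rw [hr] at hj
          rw [hj]
          have hsws : PySem.Chars.startswith (a ++ '\n' :: rest) pvDef = true := by
            rw [PySem.Chars.startswith_iff]
            exact ((pvPrefix_line rest ha).mpr ((PySem.Chars.startswith_iff _ _).mp hsw))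
          rw [pvG_of_startswith hsws]
          simp
      · have hq : pvQ a = true := by simp [pvQ, hsw]
        rw [List.dropWhile_cons, hq, if_pos rfl]
        have hlen : rest.length ≤ n := by
          have := hs
          simp only [List.length_append, List.length_cons] at this
          omega
        rw [ih rest hlen]
        -- pvG true (a ++ '\n' :: rest) = pvG true rest
        have hnp : ¬ pvDef <+: (a ++ '\n' :: rest) := by
          rw [pvPrefix_line rest ha]
          intro hp
          exact hsw ((PySem.Chars.startswith_iff _ _).mpr hp)
        cases a with
        | nil =>
          simp only [List.nil_append, pvG]
          rw [show (PySem.Chars.startswith ('\n' :: rest) pvDef) = false by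
            rw [Bool.eq_false_iff]; intro hx
            exact hnp (by simpa using (PySem.Chars.startswith_iff _ _).mp hx)]
          simp
        | cons c a' =>
          have hc : c ≠ '\n' := fun hcc => ha (hcc ▸ List.mem_cons_self)
          have ha' : '\n' ∉ a' := fun hr => ha (List.mem_cons_of_mem _ hr)
          simp only [List.cons_append, pvG]
          rw [show (true && PySem.Chars.startswith (c :: (a' ++ '\n' :: rest)) pvDef) = false by
            simp only [Bool.true_and]; rw [Bool.eq_false_iff]; intro hx
            exact hnp (by simpa using (PySem.Chars.startswith_iff _ _).mp hx)]
        -- now goal: (if false = true …) — finish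
          rw [if_neg (by simp), show (c == '\n') = false by simp [hc]]
          exact (pvG_false_line rest ha').symm
    · -- single line
      rw [pvSplit_no_nl hnl]
      by_cases hsw : PySem.Chars.startswith s pvDef = true
      · have hq : pvQ s = false := by simp [pvQ, hsw]
        rw [List.dropWhile_cons, hq, if_neg (by simp), PySem.Chars.join_singleton,
          pvG_of_startswith hsw]
      · have hq : pvQ s = true := by simp [pvQ, hsw]
        rw [List.dropWhile_cons, hq, if_pos rfl, List.dropWhile_nil]
        cases s with
        | nil => decide
        | cons c r =>
          have hc : c ≠ '\n' := fun hcc => hnl (hcc ▸ List.mem_cons_self)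
          have hr : '\n' ∉ r := fun hx => hnl (List.mem_cons_of_mem _ hx)
          simp only [pvG, Bool.true_and, hsw]
          rw [if_neg (by simp), show (c == '\n') = false by simp [hc]]
          rw [pvG_false_no_nl hr]
          decide

-- ===== B's form equals pvG true =====

theorem pvB_eq_pvG (s : List Char) :
    (if PySem.Chars.startswith s pvDef then s
     else if PySem.Chars.find s ('\n' :: pvDef) = -1 then []
     else List.drop (PySem.Chars.find s ('\n' :: pvDef)).toNat.succ s) = pvG true s := by
  by_cases hsw : PySem.Chars.startswith s pvDef = true
  · rw [if_pos hsw, pvG_of_startswith hsw]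
  · rw [if_neg (by simp [hsw])]
    have hnp : true = true → ¬ pvDef <+: s := by
      intro _ hp
      exact hsw ((PySem.Chars.startswith_iff _ _).mpr hp)
    by_cases hf : PySem.Chars.find s ('\n' :: pvDef) = -1
    · rw [if_pos hf]
      have hni : ¬ ('\n' :: pvDef) <:+: s := (PySem.Chars.find_eq_neg_one_iff _ _).mp hf
      rw [pvG_nil_of_no_infix s true hni hnp]
    · rw [if_neg hf]
      have hge : 0 ≤ PySem.Chars.find s ('\n' :: pvDef) := by
        have := PySem.Chars.neg_one_le_find s ('\n' :: pvDef)
        omega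
      obtain ⟨hpf, hmin⟩ := PySem.Chars.find_spec hge
      rw [pvG_drop_of_find s true (PySem.Chars.find s ('\n' :: pvDef)).toNat hpf hmin hnp]

-- ===== VERDICT (by name: the statement is the Claim_ definition above) =====
theorem remove_decorators_py_spec : Claim_equal_remove_decorators_py := by
  intro f _
  unfold Spec_remove_decorators_py
  apply String.toList_inj.mp
  rw [pvA_chars, pvB_chars, pvB_eq_pvG]
  exact pvA_eq_pvG f.toList.length f.toList le_rfl
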